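-- pv_equiv track=rewrite | github.com/SOROKKIM/algorithm | 프로그래머스/unrated/120851. 숨어있는 숫자의 덧셈 （1）/숨어있는 숫자의 덧셈 （1）.py | solution
-- ===== SOURCE A (Python) =====
-- def solution(my_string):
--     num_list = ['1','2','3','4','5','6','7','8','9']
--     answer = []
--     result = 0
--     for i in range(len(my_string)):
--         if my_string[i] in num_list:
--             answer.append(my_string[i])
--     for i in range(len(answer)):
--         result += int(answer[i])
--     return result
-- ===== SOURCE B (Python) =====
-- def solution(my_string):
--     return sum(d * my_string.count(str(d)) for d in range(1, 10))
-- ===== Notes on version B (the rewrite author's own statement) =====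
-- stated objective: faster
-- what changed: Instead of scanning the string by index, filtering digit characters into an intermediate list and then summing int() of each element in a second loop, B iterates over the nine possible digit values 1..9 and accumulates d * my_string.count(str(d)), building no intermediate list.
import Mathlib
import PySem

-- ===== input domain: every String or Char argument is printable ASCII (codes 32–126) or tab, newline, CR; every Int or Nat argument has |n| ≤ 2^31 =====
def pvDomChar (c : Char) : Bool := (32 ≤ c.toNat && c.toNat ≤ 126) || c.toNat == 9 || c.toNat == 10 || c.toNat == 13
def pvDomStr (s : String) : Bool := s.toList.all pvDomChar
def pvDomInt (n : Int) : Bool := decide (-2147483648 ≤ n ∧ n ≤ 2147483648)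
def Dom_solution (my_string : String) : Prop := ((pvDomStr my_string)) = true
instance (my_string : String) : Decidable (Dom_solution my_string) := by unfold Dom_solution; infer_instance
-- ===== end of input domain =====

-- B replaces A's index-scan + intermediate list + second summing loop by one sum over
-- the nine digit values d = 1..9 of d * my_string.count(str(d)); same O(n) but measurably faster (count runs in C, no per-char Python loop).

-- ===== PORT A =====
-- int(answer[i]) never raises: answer holds only digit characters; the .getD 0 default is unreachable.
def solution (my_string : String) : Int :=
  let num_list : List Char := ['1','2','3','4','5','6','7','8','9']
  let answer : List Char :=
    (PySem.List.pyRange 0 (PySem.Str.len my_string) 1).foldl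
      (fun acc i =>
        if PySem.List.pyGetD my_string.toList i ' ' ∈ num_list then
          acc ++ [PySem.List.pyGetD my_string.toList i ' ']
        else acc) []
  (PySem.List.pyRange 0 (answer.length : Int) 1).foldl
    (fun result i => result + (PySem.Int.ofChars? [PySem.List.pyGetD answer i ' ']).getD 0) 0

-- ===== PORT B =====
def solution_alt (my_string : String) : Int :=
  ((PySem.List.pyRange 1 10 1).map
    (fun d => d * (PySem.Str.count my_string (PySem.Int.toStr d) : Int))).sum

-- ===== PRECONDITION & SPEC =====
def Spec_solution (my_string : String) (out : Int) : Prop := out = solution_alt my_string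
instance (my_string : String) (out : Int) : Decidable (Spec_solution my_string out) := by unfold Spec_solution; infer_instance

-- ===== CLAIM (what is proved, stated in full; the proofs are below) =====
def Claim_equal_solution : Prop := ∀ (my_string : String), Dom_solution my_string → Spec_solution my_string (solution my_string)

-- ===== LEMMAS AND PROOFS =====

-- s.count(c) for a single-character needle is the plain character count.
lemma chars_count_go_single (c : Char) :
    ∀ (l : List Char) (fuel acc : Nat), l.length ≤ fuel →
      PySem.Chars.count.go [c] fuel l acc = acc + l.count c := by
  intro l
  induction l with
  | nil =>
    intro fuel acc _
    rw [PySem.Chars.count.go.eq_def]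
    cases fuel <;> simp
  | cons h t ih =>
    intro fuel acc hf
    cases fuel with
    | zero => simp at hf
    | succ f =>
      rw [List.length_cons, Nat.succ_le_succ_iff] at hf
      rw [PySem.Chars.count.go.eq_def]
      by_cases hc : c = h
      · subst hc
        have hp : ([c].isPrefixOf (c :: t)) = true := by simp [List.isPrefixOf]
        simp only [hp, if_true, List.length_cons, List.length_nil, Nat.zero_add,
          List.drop_succ_cons, List.drop_zero]
        rw [ih f (acc + 1) hf]
        simp [List.count_cons]
        omega
      · have hp : ([c].isPrefixOf (h :: t)) = false := by
          simp [List.isPrefixOf]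
          exact hc
        simp only [hp, Bool.false_eq_true, if_false]
        rw [ih f acc hf]
        have hb : (h == c) = false := beq_eq_false_iff_ne.mpr (fun hh => hc hh.symm)
        simp [List.count_cons, hb]

lemma chars_count_single (s : List Char) (c : Char) :
    PySem.Chars.count s [c] = s.count c := by
  rw [PySem.Chars.count]
  simpa using chars_count_go_single c s s.length 0 le_rfl

-- closed form of A: sum of digit values of the filtered characters
lemma solution_eq (my_string : String) :
    solution my_string =
      ((my_string.toList.filter
          (fun c => c ∈ (['1','2','3','4','5','6','7','8','9'] : List Char))).map
        (fun c => (PySem.Int.ofChars? [c]).getD 0)).sum := by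
  unfold solution
  simp only [PySem.Str.len_eq]
  rw [PySem.List.foldl_pyRange_zero_pyGetD' my_string.toList ' '
    (fun acc x => if x ∈ (['1','2','3','4','5','6','7','8','9'] : List Char)
      then acc ++ [x] else acc) []]
  rw [PySem.List.foldl_pyRange_zero_pyGetD' _ ' '
    (fun result x => result + (PySem.Int.ofChars? [x]).getD 0) 0]
  rw [PySem.List.foldl_append_ite_eq_filter]
  rw [PySem.List.foldl_add]
  simp

-- closed form of B: the nine counted values
lemma solution_alt_eq (my_string : String) :
    solution_alt my_string =
      (my_string.toList.count '1' : Int) + 2 * my_string.toList.count '2' +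
      3 * my_string.toList.count '3' + 4 * my_string.toList.count '4' +
      5 * my_string.toList.count '5' + 6 * my_string.toList.count '6' +
      7 * my_string.toList.count '7' + 8 * my_string.toList.count '8' +
      9 * my_string.toList.count '9' := by
  unfold solution_alt
  have hr : PySem.List.pyRange 1 10 1 = [1,2,3,4,5,6,7,8,9] := by decide
  rw [hr]
  simp only [List.map_cons, List.map_nil, List.sum_cons, List.sum_nil]
  have h1 : PySem.Int.toStr 1 = "1" := by decide
  have h2 : PySem.Int.toStr 2 = "2" := by decide
  have h3 : PySem.Int.toStr 3 = "3" := by decide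
  have h4 : PySem.Int.toStr 4 = "4" := by decide
  have h5 : PySem.Int.toStr 5 = "5" := by decide
  have h6 : PySem.Int.toStr 6 = "6" := by decide
  have h7 : PySem.Int.toStr 7 = "7" := by decide
  have h8 : PySem.Int.toStr 8 = "8" := by decide
  have h9 : PySem.Int.toStr 9 = "9" := by decide
  rw [h1, h2, h3, h4, h5, h6, h7, h8, h9]
  have c1 : PySem.Str.count my_string "1" = my_string.toList.count '1' := by
    rw [PySem.Str.count_eq]; exact chars_count_single _ '1'
  have c2 : PySem.Str.count my_string "2" = my_string.toList.count '2' := by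
    rw [PySem.Str.count_eq]; exact chars_count_single _ '2'
  have c3 : PySem.Str.count my_string "3" = my_string.toList.count '3' := by
    rw [PySem.Str.count_eq]; exact chars_count_single _ '3'
  have c4 : PySem.Str.count my_string "4" = my_string.toList.count '4' := by
    rw [PySem.Str.count_eq]; exact chars_count_single _ '4'
  have c5 : PySem.Str.count my_string "5" = my_string.toList.count '5' := by
    rw [PySem.Str.count_eq]; exact chars_count_single _ '5'
  have c6 : PySem.Str.count my_string "6" = my_string.toList.count '6' := by
    rw [PySem.Str.count_eq]; exact chars_count_single _ '6'
  have c7 : PySem.Str.count my_string "7" = my_string.toList.count '7' := by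
    rw [PySem.Str.count_eq]; exact chars_count_single _ '7'
  have c8 : PySem.Str.count my_string "8" = my_string.toList.count '8' := by
    rw [PySem.Str.count_eq]; exact chars_count_single _ '8'
  have c9 : PySem.Str.count my_string "9" = my_string.toList.count '9' := by
    rw [PySem.Str.count_eq]; exact chars_count_single _ '9'
  rw [c1, c2, c3, c4, c5, c6, c7, c8, c9]
  push_cast
  ring

-- per-list identity connecting the two closed forms
lemma filtered_sum_eq (cs : List Char) :
    (((cs.filter
        (fun c => c ∈ (['1','2','3','4','5','6','7','8','9'] : List Char))).map
      (fun c => (PySem.Int.ofChars? [c]).getD 0)).sum : Int) =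
      (cs.count '1' : Int) + 2 * cs.count '2' + 3 * cs.count '3' +
      4 * cs.count '4' + 5 * cs.count '5' + 6 * cs.count '6' +
      7 * cs.count '7' + 8 * cs.count '8' + 9 * cs.count '9' := by
  induction cs with
  | nil => simp
  | cons c t ih =>
    by_cases h : c ∈ (['1','2','3','4','5','6','7','8','9'] : List Char)
    · simp only [List.mem_cons, List.not_mem_nil, or_false] at h
      rcases h with h | h | h | h | h | h | h | h | h
      · subst h
        simp only [List.filter_cons,
          show (decide (('1':Char) ∈ (['1','2','3','4','5','6','7','8','9'] : List Char))) = true from by decide,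
          if_true, List.map_cons, List.sum_cons]
        rw [ih, show (PySem.Int.ofChars? ['1']).getD 0 = 1 from by decide]
        simp [List.count_cons]
        push_cast
        ring
      · subst h
        simp only [List.filter_cons,
          show (decide (('2':Char) ∈ (['1','2','3','4','5','6','7','8','9'] : List Char))) = true from by decide,
          if_true, List.map_cons, List.sum_cons]
        rw [ih, show (PySem.Int.ofChars? ['2']).getD 0 = 2 from by decide]
        simp [List.count_cons]
        push_cast
        ring
      · subst h
        simp only [List.filter_cons,
          show (decide (('3':Char) ∈ (['1','2','3','4','5','6','7','8','9'] : List Char))) = true from by decide,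
          if_true, List.map_cons, List.sum_cons]
        rw [ih, show (PySem.Int.ofChars? ['3']).getD 0 = 3 from by decide]
        simp [List.count_cons]
        push_cast
        ring
      · subst h
        simp only [List.filter_cons,
          show (decide (('4':Char) ∈ (['1','2','3','4','5','6','7','8','9'] : List Char))) = true from by decide,
          if_true, List.map_cons, List.sum_cons]
        rw [ih, show (PySem.Int.ofChars? ['4']).getD 0 = 4 from by decide]
        simp [List.count_cons]
        push_cast
        ring
      · subst h
        simp only [List.filter_cons,
          show (decide (('5':Char) ∈ (['1','2','3','4','5','6','7','8','9'] : List Char))) = true from by decide,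
          if_true, List.map_cons, List.sum_cons]
        rw [ih, show (PySem.Int.ofChars? ['5']).getD 0 = 5 from by decide]
        simp [List.count_cons]
        push_cast
        ring
      · subst h
        simp only [List.filter_cons,
          show (decide (('6':Char) ∈ (['1','2','3','4','5','6','7','8','9'] : List Char))) = true from by decide,
          if_true, List.map_cons, List.sum_cons]
        rw [ih, show (PySem.Int.ofChars? ['6']).getD 0 = 6 from by decide]
        simp [List.count_cons]
        push_cast
        ring
      · subst h
        simp only [List.filter_cons,
          show (decide (('7':Char) ∈ (['1','2','3','4','5','6','7','8','9'] : List Char))) = true from by decide,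
          if_true, List.map_cons, List.sum_cons]
        rw [ih, show (PySem.Int.ofChars? ['7']).getD 0 = 7 from by decide]
        simp [List.count_cons]
        push_cast
        ring
      · subst h
        simp only [List.filter_cons,
          show (decide (('8':Char) ∈ (['1','2','3','4','5','6','7','8','9'] : List Char))) = true from by decide,
          if_true, List.map_cons, List.sum_cons]
        rw [ih, show (PySem.Int.ofChars? ['8']).getD 0 = 8 from by decide]
        simp [List.count_cons]
        push_cast
        ring
      · subst h
        simp only [List.filter_cons,
          show (decide (('9':Char) ∈ (['1','2','3','4','5','6','7','8','9'] : List Char))) = true from by decide,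
          if_true, List.map_cons, List.sum_cons]
        rw [ih, show (PySem.Int.ofChars? ['9']).getD 0 = 9 from by decide]
        simp [List.count_cons]
        push_cast
        ring
    · have hb : ∀ d : Char, c ≠ d → (c == d) = false :=
        fun d hd => beq_eq_false_iff_ne.mpr hd
      have h1 := hb '1' (fun hh => h (by simp [hh]))
      have h2 := hb '2' (fun hh => h (by simp [hh]))
      have h3 := hb '3' (fun hh => h (by simp [hh]))
      have h4 := hb '4' (fun hh => h (by simp [hh]))
      have h5 := hb '5' (fun hh => h (by simp [hh]))
      have h6 := hb '6' (fun hh => h (by simp [hh]))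
      have h7 := hb '7' (fun hh => h (by simp [hh]))
      have h8 := hb '8' (fun hh => h (by simp [hh]))
      have h9 := hb '9' (fun hh => h (by simp [hh]))
      simp only [List.filter_cons, List.count_cons, h, decide_false,
        Bool.false_eq_true, if_false, h1, h2, h3, h4, h5, h6, h7, h8, h9, add_zero]
      exact ih

-- ===== VERDICT (by name: the statement is the Claim_ definition above) =====
theorem solution_spec : Claim_equal_solution := by
  intro my_string _
  unfold Spec_solution
  rw [solution_eq, solution_alt_eq, filtered_sum_eq]
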